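-- pv_equiv track=rewrite | github.com/M-R-Epstein/poetics | poetics/conversions.py | get_line_indexes
-- ===== SOURCE A (Python) =====
-- def get_line_indexes(token_list):
--     start_index = 0
--     for index, token in enumerate(token_list):
--         if index == len(token_list) - 1:
--             if token == '\n':
--                 yield(start_index, index)
--             else:
--                 yield(start_index, index + 1)
--         elif token == '\n':
--             yield(start_index, index)
--             start_index = index + 1
-- ===== SOURCE B (Python) =====
-- def get_line_indexes(token_list):
--     positions = [i for i, t in enumerate(token_list) if t == '\n']
--     start = 0
--     for p in positions:
--         yield (start, p)
--         start = p + 1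
--     if start < len(token_list):
--         yield (start, len(token_list))
-- ===== Notes on version B (the rewrite author's own statement) =====
-- stated objective: alternative
-- what changed: B first collects the newline positions, emits one segment per position in a plain loop, and handles the trailing segment in a single post-loop step, instead of A's in-loop last-index special case.
import Mathlib
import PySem

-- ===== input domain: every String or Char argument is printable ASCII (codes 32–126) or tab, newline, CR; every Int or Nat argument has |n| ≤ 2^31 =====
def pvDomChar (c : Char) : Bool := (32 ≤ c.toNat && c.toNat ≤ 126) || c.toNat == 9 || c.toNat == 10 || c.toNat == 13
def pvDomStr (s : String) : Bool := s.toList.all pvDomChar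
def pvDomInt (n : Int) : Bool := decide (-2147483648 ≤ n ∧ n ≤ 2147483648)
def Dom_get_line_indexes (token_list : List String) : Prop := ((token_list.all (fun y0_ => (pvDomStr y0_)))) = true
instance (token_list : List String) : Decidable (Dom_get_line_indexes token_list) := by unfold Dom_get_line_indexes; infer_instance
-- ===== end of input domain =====

-- B restructures A: newline positions are gathered first, segments are emitted per position,
-- and the trailing segment is one post-loop step instead of A's in-loop last-index branch.
-- Same cost (objective: alternative decomposition).

-- ===== PORT A =====
-- A's 'for index, token in enumerate(token_list)' loop as structural recursion carrying
-- the running index and start_index; n = len(token_list).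
def aGo (n : Int) : List String → Int → Int → List (Int × Int)
  | [], _, _ => []
  | t :: rest, i, start =>
    if i = n - 1 then
      (if t = "\n" then [(start, i)] else [(start, i + 1)]) ++ aGo n rest (i + 1) start
    else if t = "\n" then
      (start, i) :: aGo n rest (i + 1) (i + 1)
    else
      aGo n rest (i + 1) start

def get_line_indexes (token_list : List String) : List (Int × Int) :=
  aGo (token_list.length : Int) token_list 0 0

-- ===== PORT B =====
-- positions = [i for i, t in enumerate(token_list) if t == '\n']
def bPositions : List String → Int → List Int
  | [], _ => []
  | t :: rest, i => if t = "\n" then i :: bPositions rest (i + 1) else bPositions rest (i + 1)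

-- the 'for p in positions' loop: returns the emitted segments and the final start
def bLoop : List Int → Int → List (Int × Int) × Int
  | [], s => ([], s)
  | p :: ps, s =>
    let r := bLoop ps (p + 1)
    ((s, p) :: r.1, r.2)

def get_line_indexes_alt (token_list : List String) : List (Int × Int) :=
  let n : Int := (token_list.length : Int)
  let r := bLoop (bPositions token_list 0) 0
  if r.2 < n then r.1 ++ [(r.2, n)] else r.1

-- ===== PRECONDITION & SPEC =====
def Spec_get_line_indexes (token_list : List String) (out : List (Int × Int)) : Prop := out = get_line_indexes_alt token_list
instance (token_list : List String) (out : List (Int × Int)) : Decidable (Spec_get_line_indexes token_list out) := by unfold Spec_get_line_indexes; infer_instance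

-- ===== CLAIM (what is proved, stated in full; the proofs are below) =====
def Claim_equal_get_line_indexes : Prop := ∀ (token_list : List String), Dom_get_line_indexes token_list → Spec_get_line_indexes token_list (get_line_indexes token_list)

-- ===== LEMMAS AND PROOFS =====

-- Loop invariant: on a nonempty suffix starting at index i with start s ≤ i and n = i + length,
-- A's remaining loop equals B's segments for the remaining newline positions plus B's trailing step.
theorem aGo_eq_b (rest : List String) : ∀ (n i s : Int), rest ≠ [] → s ≤ i →
    n = i + (rest.length : Int) →
    aGo n rest i s =
      (bLoop (bPositions rest i) s).1 ++
        (if (bLoop (bPositions rest i) s).2 < n then [((bLoop (bPositions rest i) s).2, n)] else []) := by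
  induction rest with
  | nil => intro n i s h; exact absurd rfl h
  | cons t rest ih =>
    intro n i s _ hs hn
    cases rest with
    | nil =>
      simp only [List.length_cons, List.length_nil] at hn
      have hlast : i = n - 1 := by omega
      by_cases ht : t = "\n"
      · simp [aGo, bPositions, bLoop, ht, hlast]
      · simp [aGo, bPositions, bLoop, ht, hlast, show s < n by omega]
    | cons u rest' =>
      have hne : i ≠ n - 1 := by
        simp only [List.length_cons] at hn; push_cast at hn; omega
      have hlen : n = (i + 1) + ((u :: rest').length : Int) := by
        simp only [List.length_cons] at hn ⊢; push_cast at hn ⊢; omega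
      by_cases ht : t = "\n"
      · have hA : aGo n (t :: u :: rest') i s = (s, i) :: aGo n (u :: rest') (i + 1) (i + 1) := by
          rw [aGo, if_neg hne, if_pos ht]
        have hP : bPositions (t :: u :: rest') i = i :: bPositions (u :: rest') (i + 1) := by
          rw [bPositions, if_pos ht]
        have hB : bLoop (i :: bPositions (u :: rest') (i + 1)) s =
            ((s, i) :: (bLoop (bPositions (u :: rest') (i + 1)) (i + 1)).1,
             (bLoop (bPositions (u :: rest') (i + 1)) (i + 1)).2) := rfl
        rw [hA, ih n (i + 1) (i + 1) (by simp) le_rfl hlen, hP, hB]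
        simp
      · have hA : aGo n (t :: u :: rest') i s = aGo n (u :: rest') (i + 1) s := by
          rw [aGo, if_neg hne, if_neg ht]
        have hP : bPositions (t :: u :: rest') i = bPositions (u :: rest') (i + 1) := by
          rw [bPositions, if_neg ht]
        rw [hA, hP]
        exact ih n (i + 1) s (by simp) (by omega) hlen

-- ===== VERDICT (by name: the statement is the Claim_ definition above) =====
theorem get_line_indexes_spec : Claim_equal_get_line_indexes := by
  intro token_list _
  show get_line_indexes token_list = get_line_indexes_alt token_list
  cases token_list with
  | nil => decide
  | cons t rest =>
    unfold get_line_indexes get_line_indexes_alt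
    rw [aGo_eq_b (t :: rest) _ 0 0 (by simp) le_rfl (by simp)]
    by_cases hlt : (bLoop (bPositions (t :: rest) 0) 0).2 < (((t :: rest).length : Nat) : Int)
    · simp only [if_pos hlt]
    · simp only [if_neg hlt, List.append_nil]
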